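-- pv_equiv track=rewrite | github.com/harel-coffee/upclass-auto | classifier/cnn.py | encode_docs
-- ===== SOURCE A (Python) =====
-- def encode_docs(dataset, word_index, logic_docs=None, limit=None):
--     encoded_docs = []
--     doc_tags = []
--     max_doc_length = 0
--     count_docs = 0
--     word_count = {}
--     for fid, tag_in in dataset:
--         l_docvec, doc_wc = iterate_doc(tag_in, word_index)
--         word_count, doc_length = update_word_count(doc_wc, word_count)
--
--         if max_doc_length < doc_length:
--             max_doc_length = doc_length
--         if logic_docs is None or len(logic_docs) == 0:
--             doc_tags.append(fid)
--             encoded_docs.append(l_docvec)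
--         else:
--             for l_doc in logic_docs[fid]:
--                 doc_tags.append(l_doc)
--                 encoded_docs.append(l_docvec)
--         count_docs += 1
--         if limit is not None and count_docs >= limit:
--             break
--
--     return encoded_docs, doc_tags, max_doc_length, word_count
--
-- def update_word_count(doc_word_count, word_count):
--     doc_count = 0
--     for w, c in doc_word_count.items():
--         if w not in word_count:
--             word_count[w] = 0
--         word_count[w] += c
--         doc_count += c
--     return word_count, doc_count
--
-- def iterate_doc(doc, word_index):
--     encoded_doc = []
--     word_count = {}
--     for word in doc:
--         if word in word_index:
--             wi = word_index[word]
--             encoded_doc.append(wi)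
--             if word not in word_count:
--                 word_count[word] = 0
--             word_count[word] += 1
--     return encoded_doc, word_count
-- ===== SOURCE B (Python) =====
-- def encode_docs(dataset, word_index, logic_docs=None, limit=None):
--     encoded_docs = []
--     doc_tags = []
--     max_doc_length = 0
--     count_docs = 0
--     word_count = {}
--     use_logic = logic_docs is not None and len(logic_docs) != 0
--     for fid, tag_in in dataset:
--         encoded_doc = []
--         for word in tag_in:
--             if word in word_index:
--                 encoded_doc.append(word_index[word])
--                 word_count[word] = word_count.get(word, 0) + 1
--         max_doc_length = max(max_doc_length, len(encoded_doc))
--         tags = logic_docs[fid] if use_logic else [fid]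
--         doc_tags.extend(tags)
--         encoded_docs.extend([encoded_doc] * len(tags))
--         count_docs += 1
--         if limit is not None and count_docs >= limit:
--             break
--     return encoded_docs, doc_tags, max_doc_length, word_count
-- ===== Notes on version B (the rewrite author's own statement) =====
-- stated objective: simpler
-- what changed: Inlines iterate_doc and update_word_count into one pass that appends indices and bumps a single global word_count dict directly, eliminating the per-document count dict and the separate merge pass.
import Mathlib
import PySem

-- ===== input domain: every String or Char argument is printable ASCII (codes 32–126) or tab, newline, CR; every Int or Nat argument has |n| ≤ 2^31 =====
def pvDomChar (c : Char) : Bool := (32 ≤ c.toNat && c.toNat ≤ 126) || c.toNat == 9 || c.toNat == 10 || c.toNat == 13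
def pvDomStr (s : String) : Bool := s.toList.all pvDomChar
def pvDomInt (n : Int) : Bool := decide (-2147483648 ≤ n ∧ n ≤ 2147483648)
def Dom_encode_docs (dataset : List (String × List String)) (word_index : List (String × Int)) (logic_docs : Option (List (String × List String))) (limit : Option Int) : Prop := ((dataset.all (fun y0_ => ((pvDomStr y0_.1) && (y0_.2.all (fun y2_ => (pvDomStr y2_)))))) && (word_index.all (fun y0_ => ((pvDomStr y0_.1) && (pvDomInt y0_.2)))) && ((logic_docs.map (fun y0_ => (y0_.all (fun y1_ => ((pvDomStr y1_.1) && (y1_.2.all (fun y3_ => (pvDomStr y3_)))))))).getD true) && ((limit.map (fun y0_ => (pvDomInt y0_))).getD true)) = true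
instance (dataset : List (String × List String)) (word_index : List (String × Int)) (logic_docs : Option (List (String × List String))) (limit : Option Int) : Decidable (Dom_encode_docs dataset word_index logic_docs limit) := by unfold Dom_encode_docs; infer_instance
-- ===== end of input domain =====

-- B inlines A's two helpers into one pass over each document that updates a single global
-- word-count dict directly (no per-document dict, no merge pass); return values are proved equal.

-- ===== PORT A =====
-- iterate_doc: builds the encoded doc and a per-document word-count dict.
def iterate_doc (doc : List String) (word_index : PySem.Dict String Int) :
    List Int × PySem.Dict String Int :=
  doc.foldl (fun st word =>
    if word_index.contains word then
      -- word_index[word] is guarded by 'word in word_index', so getD never sees its default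
      let wi := word_index.getD word 0
      let wc := if st.2.contains word then st.2 else st.2.insert word 0
      (st.1 ++ [wi], wc.insert word (wc.getD word 0 + 1))
    else st) ([], PySem.Dict.empty)

-- update_word_count: merges a per-document count dict into the global one.
def update_word_count (doc_word_count : PySem.Dict String Int) (word_count : PySem.Dict String Int) :
    PySem.Dict String Int × Int :=
  doc_word_count.items.foldl (fun st p =>
    let wc := if st.1.contains p.1 then st.1 else st.1.insert p.1 0
    (wc.insert p.1 (wc.getD p.1 0 + p.2), st.2 + p.2)) (word_count, 0)

def encodeA_loop (wi : PySem.Dict String Int) (ld : Option (PySem.Dict String (List String)))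
    (limit : Option Int) :
    List (String × List String) → List (List Int) → List String → Int → Int →
    PySem.Dict String Int → List (List Int) × List String × Int × PySem.Dict String Int
  | [], eds, tags, maxd, _cnt, wc => (eds, tags, maxd, wc)
  | (fid, tag_in) :: rest, eds, tags, maxd, cnt, wc =>
    let r1 := iterate_doc tag_in wi
    let r2 := update_word_count r1.2 wc
    let maxd := if maxd < r2.2 then r2.2 else maxd
    let et :=
      match ld with
      | none => (eds ++ [r1.1], tags ++ [fid])
      | some d =>
        if d.size = 0 then (eds ++ [r1.1], tags ++ [fid])
        else (d.getD fid []).foldl (fun et l_doc => (et.1 ++ [r1.1], et.2 ++ [l_doc])) (eds, tags)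
    let cnt := cnt + 1
    match limit with
    | some l => if cnt ≥ l then (et.1, et.2, maxd, r2.1)
                else encodeA_loop wi ld limit rest et.1 et.2 maxd cnt r2.1
    | none => encodeA_loop wi ld limit rest et.1 et.2 maxd cnt r2.1

def encode_docs (dataset : List (String × List String)) (word_index : List (String × Int)) (logic_docs : Option (List (String × List String))) (limit : Option Int) : List (List Int) × List String × Int × (List (String × Int)) :=
  let r := encodeA_loop (PySem.Dict.ofList word_index) (logic_docs.map PySem.Dict.ofList) limit
             dataset [] [] 0 0 PySem.Dict.empty
  (r.1, r.2.1, r.2.2.1, r.2.2.2.items)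

-- ===== PORT B =====
def encodeB_loop (wi : PySem.Dict String Int) (ld : Option (PySem.Dict String (List String)))
    (useLogic : Bool) (limit : Option Int) :
    List (String × List String) → List (List Int) → List String → Int → Int →
    PySem.Dict String Int → List (List Int) × List String × Int × PySem.Dict String Int
  | [], eds, tags, maxd, _cnt, wc => (eds, tags, maxd, wc)
  | (fid, tag_in) :: rest, eds, tags, maxd, cnt, wc =>
    let r := tag_in.foldl (fun st word =>
      if wi.contains word then
        (st.1 ++ [wi.getD word 0], st.2.insert word (st.2.getD word 0 + 1))
      else st) ([], wc)
    let maxd := max maxd (r.1.length : Int)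
    let newTags := if useLogic then (ld.getD PySem.Dict.empty).getD fid [] else [fid]
    let tags := tags ++ newTags
    let eds := eds ++ List.replicate newTags.length r.1
    let cnt := cnt + 1
    match limit with
    | some l => if cnt ≥ l then (eds, tags, maxd, r.2)
                else encodeB_loop wi ld useLogic limit rest eds tags maxd cnt r.2
    | none => encodeB_loop wi ld useLogic limit rest eds tags maxd cnt r.2

def encode_docs_alt (dataset : List (String × List String)) (word_index : List (String × Int)) (logic_docs : Option (List (String × List String))) (limit : Option Int) : List (List Int) × List String × Int × (List (String × Int)) :=
  let ld := logic_docs.map PySem.Dict.ofList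
  let useLogic := match ld with | none => false | some d => d.size ≠ 0
  let r := encodeB_loop (PySem.Dict.ofList word_index) ld useLogic limit
             dataset [] [] 0 0 PySem.Dict.empty
  (r.1, r.2.1, r.2.2.1, r.2.2.2.items)

-- ===== PRECONDITION & SPEC =====
-- Pre_ excludes exactly the inputs on which Python A raises KeyError: a non-empty logic_docs
-- that is missing the fid of a document processed before the limit break.
def pvProcCount (len : Nat) (limit : Option Int) : Nat :=
  match limit with
  | none => len
  | some l => min len (max 1 l).toNat

def Pre_encode_docs (dataset : List (String × List String)) (word_index : List (String × Int)) (logic_docs : Option (List (String × List String))) (limit : Option Int) : Prop :=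
  logic_docs.getD [] = [] ∨
    ∀ p ∈ dataset.take (pvProcCount dataset.length limit), (logic_docs.getD []).any (fun q => q.1 == p.1)

instance (dataset : List (String × List String)) (word_index : List (String × Int)) (logic_docs : Option (List (String × List String))) (limit : Option Int) : Decidable (Pre_encode_docs dataset word_index logic_docs limit) := by unfold Pre_encode_docs; infer_instance

def pvWitness_encode_docs : (List (String × List String)) × (List (String × Int)) × (Option (List (String × List String))) × Option Int :=
  ([("d1", ["x", "y", "x"]), ("d2", ["z"])], [("x", 1), ("z", 3)], some [("d1", ["t1", "t2"]), ("d2", [])], none)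

def Spec_encode_docs (dataset : List (String × List String)) (word_index : List (String × Int)) (logic_docs : Option (List (String × List String))) (limit : Option Int) (out : List (List Int) × List String × Int × (List (String × Int))) : Prop := out = encode_docs_alt dataset word_index logic_docs limit
instance (dataset : List (String × List String)) (word_index : List (String × Int)) (logic_docs : Option (List (String × List String))) (limit : Option Int) (out : List (List Int) × List String × Int × (List (String × Int))) : Decidable (Spec_encode_docs dataset word_index logic_docs limit out) := by unfold Spec_encode_docs; infer_instance

-- ===== CLAIM (what is proved, stated in full; the proofs are below) =====
def Claim_equal_encode_docs : Prop := ∀ (dataset : List (String × List String)) (word_index : List (String × Int)) (logic_docs : Option (List (String × List String))) (limit : Option Int), Dom_encode_docs dataset word_index logic_docs limit → Pre_encode_docs dataset word_index logic_docs limit → Spec_encode_docs dataset word_index logic_docs limit (encode_docs dataset word_index logic_docs limit)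

-- ===== LEMMAS AND PROOFS =====

-- A's conditional "ensure key, then add" on a dict equals a single insert of getD + c.
lemma condStep_eq (d : PySem.Dict String Int) (w : String) (c : Int) :
    (let wc := if d.contains w then d else d.insert w 0;
     wc.insert w (wc.getD w 0 + c)) = d.insert w (d.getD w 0 + c) := by
  by_cases h : d.contains w
  · simp [h]
  · have h0 : d.getD w 0 = 0 := PySem.Dict.getD_of_not_contains d 0 (by simpa using h)
    simp [h, PySem.Dict.getD_insert_self, PySem.Dict.insert_insert_self, h0]

-- characterization of B's per-document fold
lemma charB (wi : PySem.Dict String Int) (doc : List String)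
    (enc0 : List Int) (wc0 : PySem.Dict String Int) :
    doc.foldl (fun st word =>
      if wi.contains word then
        (st.1 ++ [wi.getD word 0], st.2.insert word (st.2.getD word 0 + 1))
      else st) (enc0, wc0)
    = (enc0 ++ (doc.filter (fun w => wi.contains w)).map (fun w => wi.getD w 0),
       (doc.filter (fun w => wi.contains w)).foldl
         (fun d w => d.insert w (d.getD w 0 + 1)) wc0) := by
  induction doc generalizing enc0 wc0 with
  | nil => simp
  | cons x xs ih =>
    by_cases h : wi.contains x
    · simp [h, ih]
    · simp [h, ih]

-- A's iterate_doc computes the same fold as B's inline loop (step functions coincide)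
lemma iterate_doc_eq (wi : PySem.Dict String Int) (doc : List String) :
    iterate_doc doc wi
    = ((doc.filter (fun w => wi.contains w)).map (fun w => wi.getD w 0),
       PySem.Dict.counter (doc.filter (fun w => wi.contains w))) := by
  have hstep : (fun (st : List Int × PySem.Dict String Int) word =>
      if wi.contains word then
        let i := wi.getD word 0
        let wc := if st.2.contains word then st.2 else st.2.insert word 0
        (st.1 ++ [i], wc.insert word (wc.getD word 0 + 1))
      else st)
      = (fun (st : List Int × PySem.Dict String Int) word =>
      if wi.contains word then
        (st.1 ++ [wi.getD word 0], st.2.insert word (st.2.getD word 0 + 1))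
      else st) := by
    funext st word
    by_cases h : wi.contains word
    · simp only [h, if_true]
      exact congrArg _ (condStep_eq st.2 word 1)
    · simp [h]
  unfold iterate_doc
  rw [hstep, charB, ← PySem.Dict.foldl_insert_getD_add_one_eq_counter]
  simp

-- getD after a fold of "insert key (getD key + value)" over a pair list
lemma getD_foldl_insert_add (P : List (String × Int)) (d : PySem.Dict String Int) (v : String) :
    (P.foldl (fun d p => d.insert p.1 (d.getD p.1 0 + p.2)) d).getD v 0
    = d.getD v 0 + ((P.filter (fun p => p.1 == v)).map Prod.snd).sum := by
  induction P generalizing d with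
  | nil => simp
  | cons p ps ih =>
    simp only [List.foldl_cons, ih, List.filter_cons]
    by_cases h : p.1 = v
    · simp [h]; ring
    · simp [h, PySem.Dict.getD_insert, Ne.symm h]

-- a Nodup list filtered for one element
lemma nodup_filter_eq {K : List String} (hK : K.Nodup) (v : String) :
    K.filter (fun k => k == v) = if v ∈ K then [v] else [] := by
  induction K with
  | nil => simp
  | cons x xs ih =>
    rcases List.nodup_cons.mp hK with ⟨hx, hxs⟩
    simp only [List.filter_cons]
    by_cases h : x = v
    · subst h
      have hnil : List.filter (fun k => k == x) xs = [] := by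
        rw [ih hxs]; simp [hx]
      simp [hnil]
    · have hvx : ¬ v = x := fun hv => h hv.symm
      simp [h, ih hxs, hvx]

-- merging Counter(L) into wc with A's item loop = B's direct increments over L
lemma merge_counter (L : List String) (wc : PySem.Dict String Int) (h : wc.keys.Nodup) :
    (PySem.Dict.counter L).items.foldl
      (fun d p => d.insert p.1 (d.getD p.1 0 + p.2)) wc
    = L.foldl (fun d w => d.insert w (d.getD w 0 + 1)) wc := by
  have hndX : ((PySem.Dict.counter L).items.foldl
      (fun d p => d.insert p.1 (d.getD p.1 0 + p.2)) wc).keys.Nodup :=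
    PySem.Dict.nodup_keys_foldl_insert_key _ Prod.fst _ wc h
  have hndY : (L.foldl (fun d w => d.insert w (d.getD w 0 + 1)) wc).keys.Nodup :=
    PySem.Dict.nodup_keys_foldl_insert _ _ wc h
  have hkeys : ((PySem.Dict.counter L).items.foldl
      (fun d p => d.insert p.1 (d.getD p.1 0 + p.2)) wc).keys
      = (L.foldl (fun d w => d.insert w (d.getD w 0 + 1)) wc).keys := by
    rw [PySem.Dict.keys_foldl_insert_key _ Prod.fst _ wc,
      PySem.Dict.keys_foldl_insert _ _ wc]
    have hmf : (PySem.Dict.counter L).items.map Prod.fst = (PySem.Dict.counter L).keys := rfl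
    rw [hmf, PySem.Dict.keys_counter,
      PySem.Set.update_eq_append_filter, PySem.Set.update_eq_append_filter,
      PySem.Set.ofList_ofList]
  have hgetD : ∀ v, ((PySem.Dict.counter L).items.foldl
      (fun d p => d.insert p.1 (d.getD p.1 0 + p.2)) wc).getD v 0
      = (L.foldl (fun d w => d.insert w (d.getD w 0 + 1)) wc).getD v 0 := by
    intro v
    rw [getD_foldl_insert_add, PySem.Dict.getD_foldl_insert_add_one]
    congr 1
    rw [PySem.Dict.items_counter, List.filter_map]
    have hp : ((fun p : String × Int => p.1 == v) ∘ fun k => ((k, (List.count k L : Int)) : String × Int))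
        = fun k => k == v := rfl
    rw [hp, nodup_filter_eq (PySem.Set.nodup_ofList L) v]
    by_cases hv : v ∈ L
    · simp [PySem.Set.mem_ofList, hv]
    · simp [PySem.Set.mem_ofList, hv, List.count_eq_zero.mpr hv]
  apply PySem.Dict.ext
  rw [PySem.Dict.items_eq_map_keys _ hndX 0, PySem.Dict.items_eq_map_keys _ hndY 0, hkeys]
  exact List.map_congr_left (fun k _ => by rw [hgetD k])

-- total of the per-document counts is the number of matched words
lemma sum_counter_snd (L : List String) :
    (((PySem.Dict.counter L).items.map Prod.snd).sum) = (L.length : Int) := by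
  rw [PySem.Dict.items_counter, List.map_map]
  have hperm : (PySem.Set.ofList L).Perm L.dedup :=
    (List.perm_ext_iff_of_nodup (PySem.Set.nodup_ofList L) L.nodup_dedup).mpr
      (fun x => by simp [PySem.Set.mem_ofList, List.mem_dedup])
  rw [List.Perm.sum_eq (hperm.map _)]
  have hcast : (L.dedup.map (Prod.snd ∘ fun k => ((k, (List.count k L : Int)) : String × Int))).sum
      = (((L.dedup.map fun k => List.count k L).sum : Nat) : Int) := by
    rw [Nat.cast_list_sum, List.map_map]
    rfl
  rw [hcast, List.sum_map_count_dedup_eq_length]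

-- A's update_word_count on Counter(L): merged dict and the doc length
lemma update_word_count_counter (L : List String) (wc : PySem.Dict String Int)
    (h : wc.keys.Nodup) :
    update_word_count (PySem.Dict.counter L) wc
    = (L.foldl (fun d w => d.insert w (d.getD w 0 + 1)) wc, (L.length : Int)) := by
  unfold update_word_count
  have hstep : (fun (st : PySem.Dict String Int × Int) (p : String × Int) =>
      let wc := if st.1.contains p.1 then st.1 else st.1.insert p.1 0
      (wc.insert p.1 (wc.getD p.1 0 + p.2), st.2 + p.2))
      = (fun (st : PySem.Dict String Int × Int) (p : String × Int) =>
      (st.1.insert p.1 (st.1.getD p.1 0 + p.2), st.2 + p.2)) := by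
    funext st p
    exact congrArg (fun x => (x, st.2 + p.2)) (condStep_eq st.1 p.1 p.2)
  rw [hstep,
    PySem.List.foldl_prod_mk (fun d (p : String × Int) => d.insert p.1 (d.getD p.1 0 + p.2))
      (fun acc (p : String × Int) => acc + p.2) _ wc 0]
  rw [merge_counter L wc h, PySem.List.foldl_add]
  simp [sum_counter_snd]

-- A's tag/doc appending loop = extend with the list and replicate
lemma tags_fold (T : List String) (e0 : List (List Int)) (t0 : List String) (v : List Int) :
    T.foldl (fun et x => (et.1 ++ [v], et.2 ++ [x])) (e0, t0)
    = (e0 ++ List.replicate T.length v, t0 ++ T) := by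
  induction T generalizing e0 t0 with
  | nil => simp
  | cons x xs ih => simp [ih, List.replicate_succ]

-- Python's "if a < b: a = b" is max
lemma ite_lt_max (a b : Int) : (if a < b then b else a) = max a b := by
  rcases lt_or_ge a b with h | h
  · simp [h, max_eq_right h.le]
  · simp [not_lt.mpr h, max_eq_left h]

-- the outer loops agree from any common state with deduplicated keys
lemma loop_eq (wi : PySem.Dict String Int) (ld : Option (PySem.Dict String (List String)))
    (limit : Option Int) (rest : List (String × List String))
    (eds : List (List Int)) (tags : List String) (maxd cnt : Int)
    (wc : PySem.Dict String Int) (h : wc.keys.Nodup) :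
    encodeA_loop wi ld limit rest eds tags maxd cnt wc
    = encodeB_loop wi ld (match ld with | none => false | some d => decide (d.size ≠ 0))
        limit rest eds tags maxd cnt wc := by
  induction rest generalizing eds tags maxd cnt wc with
  | nil => cases limit <;> rfl
  | cons p rest ih =>
    rcases p with ⟨fid, tag_in⟩
    have hnd : ((tag_in.filter (fun w => wi.contains w)).foldl
        (fun d w => d.insert w (d.getD w 0 + 1)) wc).keys.Nodup :=
      PySem.Dict.nodup_keys_foldl_insert _ _ wc h
    simp only [encodeA_loop, encodeB_loop, iterate_doc_eq,
      update_word_count_counter _ _ h, charB, List.nil_append,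
      List.length_map, ite_lt_max]
    rcases ld with _ | d
    · cases limit with
      | none => simpa using ih _ _ _ _ _ hnd
      | some l =>
        by_cases hl : cnt + 1 ≥ l
        · simp [hl]
        · simpa [hl] using ih _ _ _ _ _ hnd
    · by_cases hd : d.size = 0
      · cases limit with
        | none => simpa [hd] using ih _ _ _ _ _ hnd
        | some l =>
          by_cases hl : cnt + 1 ≥ l
          · simp [hd, hl]
          · simpa [hd, hl] using ih _ _ _ _ _ hnd
      · cases limit with
        | none => simpa [hd, tags_fold] using ih _ _ _ _ _ hnd
        | some l =>
          by_cases hl : cnt + 1 ≥ l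
          · simp [hd, hl, tags_fold]
          · simpa [hd, hl, tags_fold] using ih _ _ _ _ _ hnd

-- ===== VERDICT (by name: the statement is the Claim_ definition above) =====
theorem encode_docs_spec : Claim_equal_encode_docs := by
  intro dataset word_index logic_docs limit _hdom _hpre
  unfold Spec_encode_docs encode_docs encode_docs_alt
  have h := loop_eq (PySem.Dict.ofList word_index) (logic_docs.map PySem.Dict.ofList) limit
    dataset [] [] 0 0 PySem.Dict.empty (by simp [PySem.Dict.keys_empty])
  simp only [h]
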